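-- pv_equiv track=rewrite | github.com/VG-Fish/PerforatedAI-Quantization-Experiment | src/dendritic_benchmark/training.py | _history_fieldnames
-- ===== SOURCE A (Python) =====
-- from typing import Any, Literal
--
-- def _history_fieldnames(history: list[dict[str, Any]]) -> list[str]:
--     preferred_order = [
--         "epoch",
--         "primary_metric_name",
--         "primary_metric_key",
--         "metric_direction",
--         "learning_rate",
--         "epoch_seconds",
--         "train_loss",
--         "train_primary_metric",
--         "val_loss",
--         "val_primary_metric",
--         "test_loss",
--         "test_primary_metric",
--     ]
--     seen = set()
--     fieldnames: list[str] = []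
--     for name in preferred_order:
--         if any(name in row for row in history):
--             fieldnames.append(name)
--             seen.add(name)
--     extras = sorted({key for row in history for key in row.keys() if key not in seen})
--     fieldnames.extend(extras)
--     return fieldnames
-- ===== SOURCE B (Python) =====
-- def _history_fieldnames(history):
--     preferred_order = [
--         "epoch",
--         "primary_metric_name",
--         "primary_metric_key",
--         "metric_direction",
--         "learning_rate",
--         "epoch_seconds",
--         "train_loss",
--         "train_primary_metric",
--         "val_loss",
--         "val_primary_metric",
--         "test_loss",
--         "test_primary_metric",
--     ]
--     rank = {name: i for i, name in enumerate(preferred_order)}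
--     n = len(preferred_order)
--     all_keys = {key for row in history for key in row}
--     return sorted(all_keys, key=lambda k: (rank.get(k, n), k))
-- ===== Notes on version B (the rewrite author's own statement) =====
-- stated objective: simpler
-- what changed: Replaces A's two-phase construction (scan the preferred list filtering by presence, then separately sort the remaining key set) by a single sorted() over the union of present keys with a composite (rank, name) key, where rank is a dict built once from the preferred order.
import Mathlib
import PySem

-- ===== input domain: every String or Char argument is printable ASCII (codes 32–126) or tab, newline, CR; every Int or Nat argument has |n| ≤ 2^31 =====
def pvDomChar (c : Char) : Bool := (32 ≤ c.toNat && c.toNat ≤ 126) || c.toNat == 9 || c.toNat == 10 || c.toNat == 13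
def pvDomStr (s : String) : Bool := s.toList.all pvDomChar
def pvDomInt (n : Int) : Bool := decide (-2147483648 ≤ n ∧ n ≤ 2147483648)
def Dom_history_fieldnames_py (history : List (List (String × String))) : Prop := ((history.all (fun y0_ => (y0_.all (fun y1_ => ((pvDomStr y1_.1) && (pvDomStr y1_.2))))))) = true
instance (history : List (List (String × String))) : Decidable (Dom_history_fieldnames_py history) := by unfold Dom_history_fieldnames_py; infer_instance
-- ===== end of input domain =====

-- B replaces A's two-phase build (filter the preferred list by presence, then sort the leftover keys)
-- by one single sorted() over the union of present keys with a composite (rank, name) key; objective: simpler decomposition, same cost.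

-- ===== PORT A =====
def history_fieldnames_py (history : List (List (String × String))) : List String :=
  let preferred_order : List String :=
    ["epoch", "primary_metric_name", "primary_metric_key", "metric_direction",
     "learning_rate", "epoch_seconds", "train_loss", "train_primary_metric",
     "val_loss", "val_primary_metric", "test_loss", "test_primary_metric"]
  -- for name in preferred_order: if any(name in row for row in history): fieldnames.append(name); seen.add(name)
  let st : PySem.Set String × List String :=
    preferred_order.foldl
      (fun st name =>
        if history.any (fun row => row.any (fun kv => kv.1 == name)) then
          (PySem.Set.add st.1 name, st.2 ++ [name])
        else st)
      (PySem.Set.empty, [])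
  let seen := st.1
  let fieldnames := st.2
  -- extras = sorted({key for row in history for key in row.keys() if key not in seen})
  let extras := PySem.List.sorted
    (PySem.Set.ofList
      ((history.flatMap (fun row => row.map Prod.fst)).filter
        (fun key => !(PySem.Set.contains seen key))))
    (fun x => x) false
  fieldnames ++ extras

-- ===== PORT B =====
def history_fieldnames_py_alt (history : List (List (String × String))) : List String :=
  let preferred_order : List String :=
    ["epoch", "primary_metric_name", "primary_metric_key", "metric_direction",
     "learning_rate", "epoch_seconds", "train_loss", "train_primary_metric",
     "val_loss", "val_primary_metric", "test_loss", "test_primary_metric"]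
  -- rank = {name: i for i, name in enumerate(preferred_order)}
  let rank : PySem.Dict String Int :=
    (PySem.List.enumerate preferred_order).foldl (fun d p => d.insert p.2 p.1) PySem.Dict.empty
  let n : Int := (preferred_order.length : Int)
  -- all_keys = {key for row in history for key in row}
  let all_keys : PySem.Set String :=
    PySem.Set.ofList (history.flatMap (fun row => row.map Prod.fst))
  -- sorted(all_keys, key=lambda k: (rank.get(k, n), k))
  PySem.List.sorted2 all_keys (fun k => rank.getD k n) (fun k => k) false

-- ===== PRECONDITION & SPEC =====
def Spec_history_fieldnames_py (history : List (List (String × String))) (out : List String) : Prop := out = history_fieldnames_py_alt history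
instance (history : List (List (String × String))) (out : List String) : Decidable (Spec_history_fieldnames_py history out) := by unfold Spec_history_fieldnames_py; infer_instance

-- ===== CLAIM (what is proved, stated in full; the proofs are below) =====
def Claim_equal_history_fieldnames_py : Prop := ∀ (history : List (List (String × String))), Dom_history_fieldnames_py history → Spec_history_fieldnames_py history (history_fieldnames_py history)

-- ===== LEMMAS AND PROOFS =====

-- The fixed preferred-order list, its rank dict and the composite first key, for the proofs.
def pvP : List String :=
  ["epoch", "primary_metric_name", "primary_metric_key", "metric_direction",
   "learning_rate", "epoch_seconds", "train_loss", "train_primary_metric",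
   "val_loss", "val_primary_metric", "test_loss", "test_primary_metric"]

def pvRank : PySem.Dict String Int :=
  (PySem.List.enumerate pvP).foldl (fun d p => d.insert p.2 p.1) PySem.Dict.empty

def pvF (k : String) : Int := pvRank.getD k 12

-- A's loop over preferred_order is "filter by the predicate", with seen = the same keys as a set.
lemma pv_foldA (P : List String) (p : String → Bool) (s : PySem.Set String) (l : List String) :
    P.foldl (fun st name => if p name then (PySem.Set.add st.1 name, st.2 ++ [name]) else st) (s, l)
      = (PySem.Set.update s (P.filter p), l ++ P.filter p) := by
  induction P generalizing s l with
  | nil => simp [PySem.Set.update]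
  | cons hd tl ih =>
      by_cases h : p hd <;> simp [h, ih, PySem.Set.update]

def pvp (history : List (List (String × String))) (name : String) : Bool :=
  history.any (fun row => row.any (fun kv => kv.1 == name))

def pvK (history : List (List (String × String))) : List String :=
  history.flatMap (fun row => row.map Prod.fst)

-- "any(name in row for row in history)" is membership in the flattened key list.
lemma pv_present_iff (history : List (List (String × String))) (k : String) :
    pvp history k = true ↔ k ∈ pvK history := by
  simp [pvp, pvK, List.any_eq_true, List.mem_flatMap, List.mem_map, beq_iff_eq]

lemma pv_fout (k : String) (hk : k ∉ pvP) : pvF k = 12 := by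
  apply PySem.Dict.getD_of_not_contains
  rw [PySem.Dict.contains_eq_decide_mem_keys]
  have hkeys : pvRank.keys = pvP := by decide
  rw [hkeys]; simpa using hk

-- sorted with the two-part key (k1 x, x) is sorted with the lexicographic key.
lemma pv_sorted2_lex (xs : List String) (k1 : String → Int) :
    PySem.List.sorted2 xs k1 (fun x => x) false
      = PySem.List.sorted xs (fun x => toLex (k1 x, x)) false := by
  simp only [PySem.List.sorted2, PySem.List.sorted, Bool.false_eq_true, if_false]
  have hbe : (fun (a b : String) => decide (k1 a < k1 b) || (!decide (k1 b < k1 a) && decide (a < b)))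
      = fun a b => decide (toLex (k1 a, a) < toLex (k1 b, b)) := by
    funext a b
    rcases lt_trichotomy (k1 a) (k1 b) with h|h|h
    · simp [Prod.Lex.lt_iff, h, not_lt.2 h.le]
    · simp [Prod.Lex.lt_iff, h]
    · simp [Prod.Lex.lt_iff, h, not_lt.2 h.le, ne_of_gt h]
  rw [hbe]

-- The heart of the equivalence, stated over the named pieces.
lemma pv_main (history : List (List (String × String))) :
    ([] ++ pvP.filter (pvp history)) ++
        PySem.List.sorted
          (PySem.Set.ofList
            ((pvK history).filter
              (fun key => !(PySem.Set.contains
                (PySem.Set.update PySem.Set.empty (pvP.filter (pvp history))) key))))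
          (fun x => x) false
      = PySem.List.sorted2 (PySem.Set.ofList (pvK history))
          (fun k => pvRank.getD k ((pvP.length : Int))) (fun k => k) false := by
  set K : List String := pvK history with hK
  set p : String → Bool := pvp history with hp
  have hmemp : ∀ k, p k = true ↔ k ∈ K := fun k => pv_present_iff history k
  -- the extras filter is "not a preferred name", on the elements of K
  have hfilter : (K.filter (fun key => !(PySem.Set.contains (PySem.Set.update PySem.Set.empty (pvP.filter p)) key)))
      = K.filter (fun key => !(decide (key ∈ pvP))) := by
    apply List.filter_congr
    intro x hx
    have hcont : PySem.Set.contains (PySem.Set.update PySem.Set.empty (pvP.filter p)) x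
        = decide (x ∈ pvP) := by
      rw [PySem.Set.contains_eq_decide, decide_eq_decide, PySem.Set.mem_update]
      simp [PySem.Set.empty, List.mem_filter, (hmemp x).2 hx]
    rw [hcont]
  rw [hfilter, pv_sorted2_lex]
  have hlen : ((pvP.length : Int)) = 12 := by decide
  rw [hlen, show (fun x => toLex (pvRank.getD x 12, x)) = (fun x => toLex (pvF x, x)) from rfl]
  set fp : List String := pvP.filter p with hfp
  set extras : List String :=
    PySem.List.sorted (PySem.Set.ofList (K.filter (fun key => !(decide (key ∈ pvP))))) (fun x => x) false with hex
  -- facts about the fixed list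
  have hPnd : pvP.Nodup := by decide
  have hPlt : pvP.Pairwise (fun a b => pvF a < pvF b) := by decide
  have hPlt12 : ∀ a ∈ pvP, pvF a < 12 := by decide
  -- membership in extras / fp
  have hexmem : ∀ x, x ∈ extras ↔ (x ∈ K ∧ x ∉ pvP) := by
    intro x
    rw [hex, PySem.List.mem_sorted, PySem.Set.mem_ofList, List.mem_filter]
    simp
  have hexnotP : ∀ x ∈ extras, x ∉ pvP := fun x hx => ((hexmem x).1 hx).2
  have hfpmem : ∀ x, x ∈ fp ↔ (x ∈ pvP ∧ p x = true) := by
    intro x; rw [hfp, List.mem_filter]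
  -- fp ++ extras is a rearrangement of the key set
  have hperm : (fp ++ extras).Perm (PySem.Set.ofList K) := by
    rw [List.perm_ext_iff_of_nodup _ (PySem.Set.nodup_ofList K)]
    · intro a
      rw [List.mem_append, PySem.Set.mem_ofList, hexmem, hfpmem, ← hmemp]
      by_cases haP : a ∈ pvP <;> simp [haP, hmemp]
    · rw [List.nodup_append]
      refine ⟨hPnd.filter _, ?_, ?_⟩
      · exact ((PySem.List.sorted_perm _ _ _).nodup_iff).2 (PySem.Set.nodup_ofList _)
      · intro a ha b hb
        rintro rfl
        exact hexnotP a hb ((hfpmem a).1 ha).1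
  -- the lexicographic key strictly increases along fp ++ extras
  have hpw : (fp ++ extras).Pairwise (fun a b => toLex (pvF a, a) < toLex (pvF b, b)) := by
    rw [List.pairwise_append]
    refine ⟨?_, ?_, ?_⟩
    · exact (hPlt.filter p).imp (fun h => by simp [Prod.Lex.lt_iff, h])
    · have hinc : extras.Pairwise (fun a b => a < b) := by
        rw [hex]; exact PySem.List.sorted_ofList_pairwise_lt _
      refine hinc.imp_of_mem (fun {a b} ha hb hab => ?_)
      have ha12 := pv_fout a (hexnotP a ha)
      have hb12 := pv_fout b (hexnotP b hb)
      simp [Prod.Lex.lt_iff, ha12, hb12, hab]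
    · intro a ha b hb
      have ha12 : pvF a < 12 := hPlt12 a ((hfpmem a).1 ha).1
      have hb12 := pv_fout b (hexnotP b hb)
      simp [Prod.Lex.lt_iff, ha12, hb12]
  rw [PySem.List.sorted_eq_of_perm_of_pairwise_lt _ _ _ hperm hpw]
  simp

-- ===== VERDICT (by name: the statement is the Claim_ definition above) =====
theorem history_fieldnames_py_spec : Claim_equal_history_fieldnames_py := by
  intro history _
  unfold Spec_history_fieldnames_py
  simp only [history_fieldnames_py, history_fieldnames_py_alt]
  rw [pv_foldA]
  exact pv_main history
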